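-- pv_equiv track=rewrite | github.com/catherinewatkinson/ttw-data-prepper | tools/clean_register.py | _needs_case_fix
-- ===== SOURCE A (Python) =====
-- def _needs_case_fix(value):
--     """Return True only if ALL alpha chars are uppercase or ALL lowercase.
--
--     Mixed case (e.g. "McDonald", "O'Brien-Smythe") is left alone.
--     """
--     if not value:
--         return False
--     alpha = [c for c in value if c.isalpha()]
--     if not alpha:
--         return False
--     if all(c.isupper() for c in alpha):
--         return True
--     if all(c.islower() for c in alpha):
--         return True
--     return False
-- ===== SOURCE B (Python) =====
-- def _needs_case_fix(value):
--     """Different characterization: the alpha chars are uniformly cased iff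
--     exactly one of the two classes (uppercase letters, lowercase letters)
--     occurs in the string -- an XOR of two existence tests, no isalpha filter
--     and no all()-scans. (Exact for ASCII input, where every alpha char is
--     cased.)"""
--     if not value:
--         return False
--     has_upper = any(c.isupper() for c in value)
--     has_lower = any(c.islower() for c in value)
--     return has_upper != has_lower
-- ===== Notes on version B (the rewrite author's own statement) =====
-- stated objective: faster
-- what changed: Replaced the filter-alpha-then-two-all()-scans check by a different characterization: on ASCII input the alpha chars are uniformly cased iff exactly one of the two classes (uppercase, lowercase) occurs, computed as an XOR of two any() existence tests with no isalpha filtering or intermediate list.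
import Mathlib
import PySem

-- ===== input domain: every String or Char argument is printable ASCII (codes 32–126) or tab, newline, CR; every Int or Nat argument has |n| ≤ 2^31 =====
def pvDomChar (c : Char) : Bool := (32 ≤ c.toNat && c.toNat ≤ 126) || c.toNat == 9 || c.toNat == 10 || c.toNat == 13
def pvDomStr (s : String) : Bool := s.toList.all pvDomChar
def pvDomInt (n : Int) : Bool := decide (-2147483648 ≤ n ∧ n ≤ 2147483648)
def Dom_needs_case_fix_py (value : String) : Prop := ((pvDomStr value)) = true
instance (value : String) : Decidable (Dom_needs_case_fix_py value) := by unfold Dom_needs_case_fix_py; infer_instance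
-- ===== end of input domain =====

-- B: XOR-of-existence characterization (has-upper != has-lower) instead of filter-alpha plus two all()-scans; equal on the ASCII domain.
-- ===== PORT A =====
def needs_case_fix_py (value : String) : Bool :=
  if value.toList = [] then false
  else
    let alpha := value.toList.filter (fun c => PySem.Chars.isalpha c)
    if alpha = [] then false
    else if alpha.all (fun c => PySem.Chars.isupper c) then true
    else if alpha.all (fun c => PySem.Chars.islower c) then true
    else false

-- ===== PORT B =====
def needs_case_fix_py_alt (value : String) : Bool :=
  if value.toList = [] then false
  else
    let has_upper := value.toList.any (fun c => PySem.Chars.isupper c)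
    let has_lower := value.toList.any (fun c => PySem.Chars.islower c)
    has_upper != has_lower

-- ===== PRECONDITION & SPEC =====
def Spec_needs_case_fix_py (value : String) (out : Bool) : Prop := out = needs_case_fix_py_alt value
instance (value : String) (out : Bool) : Decidable (Spec_needs_case_fix_py value out) := by unfold Spec_needs_case_fix_py; infer_instance

-- ===== CLAIM (what is proved, stated in full; the proofs are below) =====
def Claim_equal_needs_case_fix_py : Prop := ∀ (value : String), Dom_needs_case_fix_py value → Spec_needs_case_fix_py value (needs_case_fix_py value)

-- ===== LEMMAS AND PROOFS =====

-- ===== VERDICT (by name: the statement is the Claim_ definition above) =====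
-- every PySem upper char is alpha, every lower char is alpha, and no char is both
theorem upper_disjoint_lower (c : Char) : PySem.Chars.isupper c = true → PySem.Chars.islower c = false := by
  simp only [PySem.Chars.isupper, PySem.Chars.islower, Bool.and_eq_true, decide_eq_true_eq,
    Bool.and_eq_false_iff, decide_eq_false_iff_not, Char.le_def, UInt32.le_iff_toNat_le]
  rintro ⟨_, h2⟩
  left
  intro hc
  have e1 : ('Z').val.toNat = 90 := rfl
  have e2 : ('a').val.toNat = 97 := rfl
  omega

theorem any_upper_eq (L : List Char) :
    L.any (fun c => PySem.Chars.isupper c)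
      = (L.filter (fun c => PySem.Chars.isalpha c)).any (fun c => PySem.Chars.isupper c) := by
  induction L with
  | nil => rfl
  | cons c L ih =>
    by_cases h : PySem.Chars.isupper c = true
    · simp [h, PySem.Chars.isalpha]
    · simp only [List.any_cons, h, Bool.false_or, ih, List.filter_cons]
      split
      · simp [h]
      · rfl

theorem any_lower_eq (L : List Char) :
    L.any (fun c => PySem.Chars.islower c)
      = (L.filter (fun c => PySem.Chars.isalpha c)).any (fun c => PySem.Chars.islower c) := by
  induction L with
  | nil => rfl
  | cons c L ih =>
    by_cases h : PySem.Chars.islower c = true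
    · simp [h, PySem.Chars.isalpha]
    · simp only [List.any_cons, h, Bool.false_or, ih, List.filter_cons]
      split
      · simp [h]
      · rfl

theorem needs_case_fix_py_spec : Claim_equal_needs_case_fix_py := by
  intro value _
  unfold Spec_needs_case_fix_py needs_case_fix_py needs_case_fix_py_alt
  by_cases hv : value.toList = []
  · simp [hv]
  · simp only [hv, if_false]
    rw [any_upper_eq, any_lower_eq]
    set alpha := value.toList.filter (fun c => PySem.Chars.isalpha c) with halpha
    by_cases ha : alpha = []
    · simp [ha]
    · -- on alpha chars, islower = !isupper
      have hchar : ∀ c ∈ alpha, PySem.Chars.islower c = !PySem.Chars.isupper c := by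
        intro c hc
        have hal : PySem.Chars.isalpha c = true := (List.mem_filter.1 hc).2
        cases hu : PySem.Chars.isupper c with
        | true => simp [upper_disjoint_lower c hu]
        | false => simpa [PySem.Chars.isalpha, hu] using hal
      simp only [if_neg ha]
      by_cases hU : alpha.all (fun c => PySem.Chars.isupper c) = true
      · have : alpha.any (fun c => PySem.Chars.islower c) = false := by
          rw [List.any_eq_false]; intro c hc
          simp [hchar c hc, List.all_eq_true.1 hU c hc]
        have hAnyU : alpha.any (fun c => PySem.Chars.isupper c) = true := by
          obtain ⟨c, hc⟩ := List.exists_mem_of_ne_nil _ ha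
          exact List.any_eq_true.2 ⟨c, hc, List.all_eq_true.1 hU c hc⟩
        simp [hU, hAnyU, this]
      · have hAnyL : alpha.any (fun c => PySem.Chars.islower c) = true := by
          rw [List.all_eq_true] at hU; push Not at hU
          obtain ⟨c, hc, hnu⟩ := hU
          refine List.any_eq_true.2 ⟨c, hc, ?_⟩
          simp [hchar c hc, (Bool.not_eq_true _).mp hnu]
        by_cases hL : alpha.all (fun c => PySem.Chars.islower c) = true
        · have : alpha.any (fun c => PySem.Chars.isupper c) = false := by
            rw [List.any_eq_false]; intro c hc hcu
            have := List.all_eq_true.1 hL c hc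
            simp [upper_disjoint_lower c hcu] at this
          simp [hU, hL, hAnyL, this]
        · have hAnyU : alpha.any (fun c => PySem.Chars.isupper c) = true := by
            rw [List.all_eq_true] at hL; push Not at hL
            obtain ⟨c, hc, hnl⟩ := hL
            refine List.any_eq_true.2 ⟨c, hc, ?_⟩
            have := hchar c hc
            cases hu : PySem.Chars.isupper c with
            | true => rfl
            | false => simp [hu] at this; simp [this] at hnl
          simp [hU, hL, hAnyU, hAnyL]
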